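-- pv_equiv track=rewrite | github.com/AlikBook/Guide-me | fastapi-backend/app/functions/functionsV3.py | get_unique_stops_per_line
-- ===== SOURCE A (Python) =====
-- def get_unique_stops_per_line(metro_info):
--     metro_stations = {}
--     for stop_id, stop_name, line_n, wheelchair in metro_info:
--         metro_key = f"Metro :{line_n}"
--         if metro_key not in metro_stations:
--             metro_stations[metro_key] = {}
--         if stop_name not in metro_stations[metro_key]:
--             metro_stations[metro_key][stop_name] = stop_id
--
--     sorted_metro = dict(
--         sorted(metro_stations.items(), key=lambda item: int(item[0].split(":")[1]))
--     )
--     return sorted_metro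
-- ===== SOURCE B (Python) =====
-- def get_unique_stops_per_line(metro_info):
--     # Group-by-rescan: one outer loop over the distinct metro keys (first-seen
--     # order), and for each key a full rescan of the rows collecting its stops
--     # first-wins; then the same numeric sort of the lines as the spec asks.
--     metro_keys = dict.fromkeys(f"Metro :{line_n}" for _, _, line_n, _ in metro_info)
--     stations = {}
--     for metro_key in metro_keys:
--         stops = {}
--         for stop_id, stop_name, line_n, _ in metro_info:
--             if f"Metro :{line_n}" == metro_key and stop_name not in stops:
--                 stops[stop_name] = stop_id
--         stations[metro_key] = stops
--     return dict(
--         sorted(stations.items(), key=lambda item: int(item[0].split(":")[1]))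
--     )
-- ===== Notes on version B (the rewrite author's own statement) =====
-- stated objective: alternative
-- what changed: A builds the nested dict incrementally in a single pass over the rows; B instead collects the distinct metro keys and, for each key, rescans the whole row list to gather that line's stops first-wins (group-by-rescan), then applies the same numeric sort of the lines.
import Mathlib
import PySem

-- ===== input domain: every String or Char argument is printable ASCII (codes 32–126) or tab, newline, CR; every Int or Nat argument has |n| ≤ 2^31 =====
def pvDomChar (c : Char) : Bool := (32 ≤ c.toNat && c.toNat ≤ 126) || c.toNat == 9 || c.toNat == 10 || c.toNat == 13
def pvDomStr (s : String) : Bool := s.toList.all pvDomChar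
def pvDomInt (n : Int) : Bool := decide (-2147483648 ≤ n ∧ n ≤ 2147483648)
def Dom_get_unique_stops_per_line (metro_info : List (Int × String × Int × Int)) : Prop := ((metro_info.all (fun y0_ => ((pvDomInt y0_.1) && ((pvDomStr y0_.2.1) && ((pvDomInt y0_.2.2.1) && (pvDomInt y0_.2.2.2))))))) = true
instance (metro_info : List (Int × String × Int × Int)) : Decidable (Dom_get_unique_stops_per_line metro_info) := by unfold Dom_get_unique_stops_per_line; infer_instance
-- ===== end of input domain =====

-- B replaces A's single-pass incremental nested-dict build by a group-by-rescan:
-- one outer loop over the distinct metro keys, each with a full rescan of the rows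
-- (objective: alternative algorithm, not faster).

-- the f-string key f"Metro :{line_n}", shared verbatim by both Pythons
def pvKey (r : Int × String × Int × Int) : String := "Metro :" ++ PySem.Int.toStr r.2.2.1

-- sort key shared by both Pythons verbatim: lambda item: int(item[0].split(":")[1]).
-- The keys always have the shape "Metro :<int>", so the [1] index and int() never fail;
-- the .getD fallbacks below are therefore exact on every reachable key.
def pvSortKey (kv : String × PySem.Dict String Int) : Int :=
  (PySem.Int.ofStr? (((PySem.Str.split? kv.1 ":").getD []).getD 1 "")).getD 0

-- ===== PORT A =====
-- one iteration of A's for-loop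
def pvStepA (d : PySem.Dict String (PySem.Dict String Int)) (r : Int × String × Int × Int) :
    PySem.Dict String (PySem.Dict String Int) :=
  let metro_key := pvKey r
  let d1 := if d.contains metro_key then d else d.insert metro_key PySem.Dict.empty
  if (d1.getD metro_key PySem.Dict.empty).contains r.2.1 then d1
  else d1.insert metro_key ((d1.getD metro_key PySem.Dict.empty).insert r.2.1 r.1)

def get_unique_stops_per_line (metro_info : List (Int × String × Int × Int)) :
    List (String × List (String × Int)) :=
  let metro_stations := metro_info.foldl pvStepA PySem.Dict.empty
  let sorted_metro :=
    PySem.Dict.ofList (PySem.List.sorted metro_stations.items pvSortKey false)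
  sorted_metro.items.map (fun p => (p.1, p.2.items))

-- ===== PORT B =====
-- B's inner rescan: the stops of the line named by metro_key, first-wins
def pvStops (metro_info : List (Int × String × Int × Int)) (metro_key : String) :
    PySem.Dict String Int :=
  metro_info.foldl
    (fun s r => if pvKey r == metro_key && !(s.contains r.2.1) then s.insert r.2.1 r.1 else s)
    PySem.Dict.empty

def get_unique_stops_per_line_alt (metro_info : List (Int × String × Int × Int)) :
    List (String × List (String × Int)) :=
  let metro_keys := PySem.List.dedup (metro_info.map pvKey)
  let stations := metro_keys.foldl
    (fun st metro_key => st.insert metro_key (pvStops metro_info metro_key)) PySem.Dict.empty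
  (PySem.Dict.ofList (PySem.List.sorted stations.items pvSortKey false)).items.map
    (fun p => (p.1, p.2.items))

-- ===== PRECONDITION & SPEC =====
def Spec_get_unique_stops_per_line (metro_info : List (Int × String × Int × Int)) (out : List (String × List (String × Int))) : Prop := out = get_unique_stops_per_line_alt metro_info
instance (metro_info : List (Int × String × Int × Int)) (out : List (String × List (String × Int))) : Decidable (Spec_get_unique_stops_per_line metro_info out) := by unfold Spec_get_unique_stops_per_line; infer_instance

-- ===== CLAIM (what is proved, stated in full; the proofs are below) =====
def Claim_equal_get_unique_stops_per_line : Prop := ∀ (metro_info : List (Int × String × Int × Int)), Dom_get_unique_stops_per_line metro_info → Spec_get_unique_stops_per_line metro_info (get_unique_stops_per_line metro_info)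

-- ===== LEMMAS AND PROOFS =====

-- first-wins insertion of one row into an inner dict (the common inner step)
def pvInner (s : PySem.Dict String Int) (r : Int × String × Int × Int) : PySem.Dict String Int :=
  if s.contains r.2.1 then s else s.insert r.2.1 r.1

-- one A-step adds (at most) the row's key
lemma pvKeys_stepA (d : PySem.Dict String (PySem.Dict String Int)) (r : Int × String × Int × Int) :
    (pvStepA d r).keys = PySem.Set.add d.keys (pvKey r) := by
  have hck : PySem.Set.contains d.keys (pvKey r) = d.contains (pvKey r) := by
    show d.keys.contains (pvKey r) = d.contains (pvKey r)
    rw [Bool.eq_iff_iff, List.contains_iff_mem, PySem.Dict.contains_iff_mem_keys]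
  cases hc : d.contains (pvKey r) with
  | true =>
      simp only [pvStepA, PySem.Set.add, hc, hck, if_true]
      by_cases hn : (d.getD (pvKey r) PySem.Dict.empty).contains r.2.1
      · simp [hn]
      · simp only [hn, Bool.false_eq_true, if_false]
        exact PySem.Dict.keys_insert_of_contains d _ hc
  | false =>
      simp only [pvStepA, PySem.Set.add, hc, hck, Bool.false_eq_true, if_false]
      rw [PySem.Dict.getD_insert_self]
      simp only [PySem.Dict.contains_empty, Bool.false_eq_true, if_false]
      rw [PySem.Dict.keys_insert_of_contains _ _ (PySem.Dict.contains_insert_self _ _ _),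
        PySem.Dict.keys_insert_of_not_contains d _ hc]

-- keys of A's fold = running Set.add over the rows' keys
lemma pvKeys_foldA (rows : List (Int × String × Int × Int)) :
    ∀ (d : PySem.Dict String (PySem.Dict String Int)),
    (rows.foldl pvStepA d).keys = (rows.map pvKey).foldl PySem.Set.add d.keys := by
  induction rows with
  | nil => intro d; rfl
  | cons r rows ih => intro d; simp only [List.foldl_cons, List.map_cons, ih, pvKeys_stepA]

-- one A-step seen through getD with default {}
lemma pvGetD_stepA (d : PySem.Dict String (PySem.Dict String Int)) (r : Int × String × Int × Int)
    (k : String) :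
    (pvStepA d r).getD k PySem.Dict.empty =
      if pvKey r == k then pvInner (d.getD k PySem.Dict.empty) r
      else d.getD k PySem.Dict.empty := by
  by_cases hk : pvKey r = k
  · subst hk
    simp only [pvStepA, pvInner, beq_self_eq_true, if_true]
    cases hc : d.contains (pvKey r) with
    | true =>
        simp only [if_true]
        by_cases hn : (d.getD (pvKey r) PySem.Dict.empty).contains r.2.1
        · simp [hn]
        · simp only [hn, Bool.false_eq_true, if_false]
          rw [PySem.Dict.getD_insert_self]
    | false =>
        simp only [Bool.false_eq_true, if_false]
        rw [PySem.Dict.getD_insert_self, PySem.Dict.getD_of_not_contains _ _ hc]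
        simp only [PySem.Dict.contains_empty, Bool.false_eq_true, if_false]
        rw [PySem.Dict.getD_insert_self]
  · have hbk : (pvKey r == k) = false := beq_eq_false_iff_ne.mpr hk
    have hne : k ≠ pvKey r := fun h => hk h.symm
    simp only [pvStepA, pvInner, hbk, Bool.false_eq_true, if_false]
    cases hc : d.contains (pvKey r) with
    | true =>
        simp only [if_true]
        by_cases hn : (d.getD (pvKey r) PySem.Dict.empty).contains r.2.1
        · simp [hn]
        · simp only [hn, Bool.false_eq_true, if_false]
          rw [PySem.Dict.getD_insert_of_ne _ _ _ hne]
    | false =>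
        simp only [Bool.false_eq_true, if_false]
        rw [PySem.Dict.getD_insert_self]
        simp only [PySem.Dict.contains_empty, Bool.false_eq_true, if_false]
        rw [PySem.Dict.getD_insert_of_ne _ _ _ hne, PySem.Dict.getD_insert_of_ne _ _ _ hne]

-- A's fold at key k = first-wins fold over the rows of that key
lemma pvGetD_foldA (rows : List (Int × String × Int × Int)) :
    ∀ (d : PySem.Dict String (PySem.Dict String Int)) (k : String),
    (rows.foldl pvStepA d).getD k PySem.Dict.empty =
      (rows.filter (fun r => pvKey r == k)).foldl pvInner (d.getD k PySem.Dict.empty) := by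
  induction rows with
  | nil => intro d k; rfl
  | cons r rows ih =>
      intro d k
      simp only [List.foldl_cons, List.filter_cons, ih, pvGetD_stepA]
      by_cases h : pvKey r == k
      · simp [h]
      · simp [h]

-- B's guarded rescan = first-wins fold over the rows of that key
lemma pvStops_eq_filter (rows : List (Int × String × Int × Int)) (k : String) :
    ∀ (s : PySem.Dict String Int),
    rows.foldl
        (fun s r => if pvKey r == k && !(s.contains r.2.1) then s.insert r.2.1 r.1 else s) s
      = (rows.filter (fun r => pvKey r == k)).foldl pvInner s := by
  induction rows with
  | nil => intro s; rfl
  | cons r rows ih =>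
      intro s
      simp only [List.foldl_cons, List.filter_cons]
      by_cases h : pvKey r == k
      · simp only [h, Bool.true_and, ih]
        cases hc : s.contains r.2.1 <;> simp [pvInner, hc]
      · simp only [h, Bool.false_and, Bool.false_eq_true, if_false, ih,
          Bool.false_eq_true, if_false]

-- the two station dicts have identical items lists
lemma pvStations_eq (rows : List (Int × String × Int × Int)) :
    rows.foldl pvStepA PySem.Dict.empty =
      (PySem.List.dedup (rows.map pvKey)).foldl
        (fun st k => st.insert k (pvStops rows k)) PySem.Dict.empty := by
  have hkeys : (rows.foldl pvStepA PySem.Dict.empty).keys = PySem.List.dedup (rows.map pvKey) := by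
    rw [pvKeys_foldA, PySem.List.dedup_eq_ofList, PySem.Set.ofList_eq_foldl]; rfl
  have hnd : (rows.foldl pvStepA PySem.Dict.empty).keys.Nodup := by
    rw [hkeys, PySem.List.dedup_eq_ofList]; exact PySem.Set.nodup_ofList _
  apply PySem.Dict.ext
  rw [PySem.Dict.items_eq_map_keys _ hnd PySem.Dict.empty, hkeys,
    PySem.Dict.items_foldl_insert_fresh (PySem.List.dedup (rows.map pvKey)) (fun k => k)
      (pvStops rows) PySem.Dict.empty (fun a _ => PySem.Dict.contains_empty a)
      (by rw [List.map_id']; rw [PySem.List.dedup_eq_ofList]; exact PySem.Set.nodup_ofList _)]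
  have hie : (PySem.Dict.empty : PySem.Dict String (PySem.Dict String Int)).items = [] := rfl
  rw [hie, List.nil_append]
  apply List.map_congr_left
  intro k _
  rw [pvGetD_foldA, PySem.Dict.getD_empty]
  unfold pvStops
  rw [pvStops_eq_filter]

-- ===== VERDICT (by name: the statement is the Claim_ definition above) =====
theorem get_unique_stops_per_line_spec : Claim_equal_get_unique_stops_per_line := by
  intro metro_info _
  unfold Spec_get_unique_stops_per_line get_unique_stops_per_line get_unique_stops_per_line_alt
  rw [pvStations_eq]
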